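-- pv_equiv track=rewrite | github.com/dmi-interface/DMI | ufo/automator/ui_control/dmi.py | clean_copy_suffix_from_path
-- ===== SOURCE A (Python) =====
-- def clean_copy_suffix_from_id(unique_id):
--     """
--     Remove the copy suffix from unique_id, compatible with the new _copy{n} format
--
--     Args:
--         unique_id: An ID that may contain a copy suffix
--
--     Returns:
--         str: The cleaned original ID
--     """
--     if not unique_id:
--         return unique_id
--
--     # Handle the new format: original_id_copy1, original_id_copy2, etc.
--     if '_copy' in unique_id:
--         # Find the position of the last occurrence of _copy
--         copy_index = unique_id.rfind('_copy')
--         if copy_index != -1: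
--             # Check whether _copy is followed by digits
--             suffix = unique_id[copy_index + 5:]  # 5 is the length of "_copy"
--             if suffix.isdigit():
--                 return unique_id[:copy_index]
--
--     # Handle the old format: original_id[copy_...] (for backward compatibility)
--     if '[copy_' in unique_id:
--         bracket_index = unique_id.find('[copy_')
--         if bracket_index != -1:
--             return unique_id[:bracket_index]
--
--     # If there is no copy suffix, return the original ID directly
--     return unique_id
--
-- def clean_copy_suffix_from_path(navigation_path):
--     """
--     Remove the copy suffix from all elements in navigation_path,
--     compatible with the new _copy{n} format
--
--     Args:
--         navigation_path: A path list that may contain copy suffixes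
--
--     Returns:
--         list: The cleaned path list
--     """
--     if not navigation_path:
--         return navigation_path
--
--     cleaned_path = []
--     for path_item in navigation_path:
--         cleaned_item = clean_copy_suffix_from_id(path_item)
--         cleaned_path.append(cleaned_item)
--
--     return cleaned_path
-- ===== SOURCE B (Python) =====
-- def _clean_item(s):
--     # scan backwards over the maximal run of trailing digits
--     i = len(s)
--     while i > 0 and s[i - 1].isdigit():
--         i -= 1
--     if i < len(s) and s[:i].endswith('_copy'):
--         return s[:i - 5]
--     idx = s.find('[copy_')
--     return s if idx < 0 else s[:idx]
--
--
-- def clean_copy_suffix_from_path(navigation_path):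
--     return [_clean_item(s) for s in navigation_path]
-- ===== Notes on version B (the rewrite author's own statement) =====
-- stated objective: alternative
-- what changed: Per-item cleaning replaces rfind('_copy')+slice+whole-suffix isdigit with a backward scan over the maximal trailing digit run followed by an endswith('_copy') check, and the old-format branch becomes an unconditional find/truncate; the outer accumulator loop becomes a comprehension.
import Mathlib
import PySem

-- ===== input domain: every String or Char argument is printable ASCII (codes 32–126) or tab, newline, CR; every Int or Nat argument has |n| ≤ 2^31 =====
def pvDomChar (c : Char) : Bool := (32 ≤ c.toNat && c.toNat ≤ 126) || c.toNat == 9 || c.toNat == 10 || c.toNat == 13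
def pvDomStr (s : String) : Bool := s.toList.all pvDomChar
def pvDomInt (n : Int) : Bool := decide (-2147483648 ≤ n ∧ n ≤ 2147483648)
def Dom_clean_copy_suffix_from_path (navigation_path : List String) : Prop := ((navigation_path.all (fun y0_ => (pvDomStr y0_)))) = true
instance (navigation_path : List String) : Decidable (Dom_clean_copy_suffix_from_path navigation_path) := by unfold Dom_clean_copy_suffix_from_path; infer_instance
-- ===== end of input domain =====

-- B replaces the rfind/slice/isdigit scan by a backward trailing-digit scan plus endswith, and the
-- accumulator loop by a map (alternative decomposition, same cost).

-- ===== PORT A =====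
-- old-format fallthrough of clean_copy_suffix_from_id: the '[copy_' check and the final return
def pvBracketA (s : String) : String :=
  if PySem.Str.isIn "[copy_" s then
    let bi := PySem.Str.find s "[copy_"
    if bi ≠ -1 then PySem.Str.slice s none (some bi) else s
  else s

def clean_copy_suffix_from_id (s : String) : String :=
  if s == "" then s
  else if PySem.Str.isIn "_copy" s then
    let ci := PySem.Str.rfind s "_copy"
    if ci ≠ -1 then
      let suffix := PySem.Str.slice s (some (ci + 5)) none
      if PySem.Str.strIsdigit suffix then PySem.Str.slice s none (some ci)
      else pvBracketA s
    else pvBracketA s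
  else pvBracketA s

def clean_copy_suffix_from_path (navigation_path : List String) : List String :=
  if navigation_path.isEmpty then navigation_path
  else navigation_path.foldl (fun acc x => acc ++ [clean_copy_suffix_from_id x]) []

-- ===== PORT B =====
-- 'i = len(s); while i > 0 and s[i-1].isdigit(): i -= 1'  (index always in range when read)
def pvDigStart (cs : List Char) : Nat → Nat
  | 0 => 0
  | j + 1 => if PySem.Chars.isdigit (cs.getD j ' ') then pvDigStart cs j else j + 1

def pvCleanItemAlt (s : String) : String :=
  let cs := s.toList
  let i := pvDigStart cs cs.length
  if i < cs.length ∧ PySem.Chars.endswith (cs.take i) ("_copy".toList) then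
    String.ofList (cs.take (i - 5))
  else
    let idx := PySem.Str.find s "[copy_"
    if idx < 0 then s else PySem.Str.slice s none (some idx)

def clean_copy_suffix_from_path_alt (navigation_path : List String) : List String :=
  navigation_path.map pvCleanItemAlt

-- ===== PRECONDITION & SPEC =====
def Spec_clean_copy_suffix_from_path (navigation_path : List String) (out : List String) : Prop := out = clean_copy_suffix_from_path_alt navigation_path
instance (navigation_path : List String) (out : List String) : Decidable (Spec_clean_copy_suffix_from_path navigation_path out) := by unfold Spec_clean_copy_suffix_from_path; infer_instance

-- ===== CLAIM (what is proved, stated in full; the proofs are below) =====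
def Claim_equal_clean_copy_suffix_from_path : Prop := ∀ (navigation_path : List String), Dom_clean_copy_suffix_from_path navigation_path → Spec_clean_copy_suffix_from_path navigation_path (clean_copy_suffix_from_path navigation_path)

-- ===== LEMMAS AND PROOFS =====

-- ---- facts about B's backward digit scan ----
theorem digStart_le (cs : List Char) (j : Nat) : pvDigStart cs j ≤ j := by
  induction j with
  | zero => simp [pvDigStart]
  | succ j ih =>
    simp only [pvDigStart]
    split
    · omega
    · exact Nat.le_refl _

theorem digStart_digits (cs : List Char) (j : Nat) :
    ∀ m, pvDigStart cs j ≤ m → m < j → PySem.Chars.isdigit (cs.getD m ' ') = true := by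
  induction j with
  | zero => intro m _ h; omega
  | succ j ih =>
    intro m h1 h2
    simp only [pvDigStart] at h1
    split at h1
    · case isTrue hd =>
      by_cases hm : m = j
      · subst hm; exact hd
      · exact ih m h1 (by omega)
    · omega

theorem digStart_eq (cs : List Char) (i0 : Nat) : ∀ j, i0 ≤ j →
    (∀ m, i0 ≤ m → m < j → PySem.Chars.isdigit (cs.getD m ' ') = true) →
    (i0 = 0 ∨ PySem.Chars.isdigit (cs.getD (i0 - 1) ' ') = false) →
    pvDigStart cs j = i0 := by
  intro j
  induction j with
  | zero => intro h _ _; simp [pvDigStart]; omega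
  | succ j ih =>
    intro h1 h2 h3
    by_cases he : i0 = j + 1
    · subst he
      simp only [pvDigStart]
      rcases h3 with h3 | h3
      · omega
      · simp only [Nat.add_sub_cancel] at h3
        split
        · next hd =>
            rw [List.getD_eq_getElem?_getD] at h3
            exact absurd hd (by simp [h3])
        · rfl
    · have hle : i0 ≤ j := by omega
      simp only [pvDigStart]
      rw [if_pos (h2 j hle (Nat.lt_succ_self _))]
      exact ih hle (fun m hm hmj => h2 m hm (by omega)) h3

-- ---- facts about Python's rfind (port-specific characterisation of Chars.rfind.go) ----
theorem rfind_go_exists (s sub : List Char) (j : Nat)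
    (h : PySem.Chars.rfind.go s sub j ≠ -1) :
    ∃ k, k ≤ j ∧ PySem.Chars.rfind.go s sub j = (k : Int) ∧ sub <+: s.drop k := by
  induction j with
  | zero =>
    simp only [PySem.Chars.rfind.go] at h ⊢
    split at h
    · case isTrue hp =>
      exact ⟨0, Nat.le_refl _, by simp [hp],
        by simpa using List.isPrefixOf_iff_prefix.1 hp⟩
    · exact absurd rfl h
  | succ j ih =>
    simp only [PySem.Chars.rfind.go] at h ⊢
    split
    · case isTrue hp =>
      exact ⟨j + 1, Nat.le_refl _, rfl, List.isPrefixOf_iff_prefix.1 hp⟩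
    · case isFalse hp =>
      rw [if_neg hp] at h
      obtain ⟨k, hk, he, hpre⟩ := ih h
      exact ⟨k, by omega, he, hpre⟩

theorem rfind_go_eq (s sub : List Char) (k : Nat) : ∀ j, k ≤ j → sub <+: s.drop k →
    (∀ m, k < m → m ≤ j → ¬ sub <+: s.drop m) →
    PySem.Chars.rfind.go s sub j = (k : Int) := by
  intro j
  induction j with
  | zero =>
    intro h1 h2 _
    have hk0 : k = 0 := by omega
    subst hk0
    simp only [PySem.Chars.rfind.go]
    rw [if_pos (List.isPrefixOf_iff_prefix.2 (by simpa using h2))]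
    simp
  | succ j ih =>
    intro h1 h2 h3
    by_cases he : k = j + 1
    · subst he
      simp only [PySem.Chars.rfind.go]
      rw [if_pos (List.isPrefixOf_iff_prefix.2 h2)]
    · have hle : k ≤ j := by omega
      simp only [PySem.Chars.rfind.go]
      rw [if_neg (fun hp => h3 (j + 1) (by omega) (Nat.le_refl _)
        (List.isPrefixOf_iff_prefix.1 hp))]
      exact ih hle h2 (fun m hm1 hm2 => h3 m hm1 (by omega))

-- the old-format branch of A equals B's find/truncate tail
theorem bracket_eq (s : String) :
    pvBracketA s = if PySem.Str.find s "[copy_" < 0 then s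
                   else PySem.Str.slice s none (some (PySem.Str.find s "[copy_")) := by
  simp only [pvBracketA, PySem.Str.isIn, PySem.Chars.isIn, PySem.Str.find]
  by_cases h : PySem.Chars.find s.toList ['[', 'c', 'o', 'p', 'y', '_'] = -1
  · simp [h]
  · have hle := PySem.Chars.neg_one_le_find s.toList ['[', 'c', 'o', 'p', 'y', '_']
    simp [h, show ¬ PySem.Chars.find s.toList ['[', 'c', 'o', 'p', 'y', '_'] < 0 by omega]

-- the zeta-reduced statement of per-item equality (defeq to the unfolded ports for s ≠ "")
theorem item_eq_core (s : String) :
    (if PySem.Str.isIn "_copy" s = true then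
       (if PySem.Str.rfind s "_copy" ≠ -1 then
          (if PySem.Str.strIsdigit (PySem.Str.slice s (some (PySem.Str.rfind s "_copy" + 5)) none) = true
           then PySem.Str.slice s none (some (PySem.Str.rfind s "_copy"))
           else pvBracketA s)
        else pvBracketA s)
     else pvBracketA s)
    =
    (if pvDigStart s.toList s.toList.length < s.toList.length ∧
        PySem.Chars.endswith (List.take (pvDigStart s.toList s.toList.length) s.toList) "_copy".toList = true then
       String.ofList (List.take (pvDigStart s.toList s.toList.length - 5) s.toList)
     else if PySem.Str.find s "[copy_" < 0 then s
          else PySem.Str.slice s none (some (PySem.Str.find s "[copy_"))) := by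
  have hcopy : ("_copy".toList : List Char) = ['_', 'c', 'o', 'p', 'y'] := rfl
  set cs := s.toList with hcs
  set n := cs.length with hn
  set i := pvDigStart cs n with hi
  have hdig : ∀ m, i ≤ m → m < n → PySem.Chars.isdigit (cs.getD m ' ') = true :=
    digStart_digits cs n
  by_cases hB : i < n ∧ PySem.Chars.endswith (List.take i cs) "_copy".toList = true
  · rw [if_pos hB]
    obtain ⟨hin, hend⟩ := hB
    have hile : i ≤ n := digStart_le cs n
    obtain ⟨p, hp⟩ := (PySem.Chars.endswith_iff _ _).1 hend
    have hlen5 : p.length + 5 = i := by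
      have h := congrArg List.length hp
      simp only [List.length_append, List.length_take, hcopy, List.length_cons,
        List.length_nil] at h
      omega
    have h5 : 5 ≤ i := by omega
    have hpp : p = List.take (i - 5) cs := by
      have h1 : List.take (i - 5) (p ++ "_copy".toList) = p := List.take_left' (by omega)
      rw [hp, List.take_take] at h1
      rw [← h1]
      congr 1
      omega
    have hdecomp : cs = List.take (i - 5) cs ++ "_copy".toList ++ List.drop i cs := by
      conv_lhs => rw [← List.take_append_drop i cs]
      rw [← hp, hpp]
    have hdrop5 : List.drop (i - 5) cs = "_copy".toList ++ List.drop i cs := by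
      conv_lhs => rw [hdecomp, List.append_assoc]
      exact List.drop_left' (by simp only [List.length_take]; omega)
    have hocc : "_copy".toList <+: List.drop (i - 5) cs := by
      rw [hdrop5]; exact List.prefix_append _ _
    have hnodig : ∀ m, i - 5 < m → m ≤ n → ¬ "_copy".toList <+: List.drop m cs := by
      intro m hm1 hm2 hpre
      have hmlen : m + 5 ≤ n := by
        have := hpre.length_le
        simp only [List.length_drop, hcopy, List.length_cons, List.length_nil] at this
        omega
      have hy : cs.getD (m + 4) ' ' = 'y' := by
        have h4 : (4 : Nat) < ("_copy".toList).length := by simp [hcopy]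
        have hg := List.IsPrefix.getElem hpre h4
        have hdrop : (List.drop m cs)[4]'(by simp only [List.length_drop]; omega)
            = cs[m + 4]'(by omega) := by
          rw [List.getElem_drop]
        have hc4 : "_copy".toList[4]'h4 = 'y' := rfl
        have hy4 : (List.drop m cs)[4]'(by simp only [List.length_drop]; omega) = 'y' :=
          hg.symm.trans hc4
        rw [List.getD_eq_getElem _ _ (by omega)]
        exact hdrop.symm.trans hy4
      have hd := hdig (m + 4) (by omega) (by omega)
      rw [hy] at hd
      exact absurd hd (by decide)
    have hrs : PySem.Str.rfind s "_copy" = ((i - 5 : Nat) : Int) := by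
      show PySem.Chars.rfind cs "_copy".toList = _
      unfold PySem.Chars.rfind
      exact rfind_go_eq cs _ (i - 5) n (by omega) hocc hnodig
    have hisin : PySem.Str.isIn "_copy" s = true := by
      rw [PySem.Str.isIn_iff_infix]
      exact ⟨List.take (i - 5) cs, List.drop i cs, by rw [← hdecomp]⟩
    rw [if_pos hisin, hrs]
    rw [if_pos (show ((i - 5 : Nat) : Int) ≠ -1 by omega)]
    rw [show ((i - 5 : Nat) : Int) + 5 = ((i : Nat) : Int) by omega]
    have hsuffix : PySem.Str.strIsdigit (PySem.Str.slice s (some ((i : Nat) : Int)) none) = true := by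
      simp only [PySem.Str.strIsdigit, PySem.Str.slice, String.toList_ofList,
        PySem.Chars.slice_eq_listSlice, PySem.List.slice_from_natCast]
      have hne' : List.drop i cs ≠ [] := by
        simp only [ne_eq, List.drop_eq_nil_iff]
        omega
      have hall : ∀ c ∈ List.drop i cs, PySem.Chars.isdigit c = true := by
        intro c hc
        obtain ⟨t, ht, hct⟩ := List.mem_iff_getElem.1 hc
        have htn : i + t < n := by
          simp only [List.length_drop] at ht
          omega
        have : c = cs.getD (i + t) ' ' := by
          rw [List.getD_eq_getElem _ _ htn, ← hct, List.getElem_drop]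
        rw [this]
        exact hdig (i + t) (by omega) htn
      unfold PySem.Chars.strIsdigit
      rw [Bool.and_eq_true]
      exact ⟨by simpa using hin, List.all_eq_true.2 hall⟩
    rw [if_pos hsuffix]
    simp only [PySem.Str.slice, PySem.Chars.slice_eq_listSlice, PySem.List.slice_to_natCast]
    rfl
  · rw [if_neg hB, ← bracket_eq]
    by_cases h1 : PySem.Str.isIn "_copy" s = true
    case neg => rw [if_neg h1]
    case pos =>
      rw [if_pos h1]
      by_cases h2 : PySem.Str.rfind s "_copy" ≠ -1
      case neg => rw [if_neg h2]
      case pos =>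
        rw [if_pos h2]
        obtain ⟨k, hk, hke, hkpre⟩ := rfind_go_exists cs "_copy".toList n h2
        have hrs : PySem.Str.rfind s "_copy" = (k : Int) := hke
        rw [hrs, show (k : Int) + 5 = ((k + 5 : Nat) : Int) by push_cast; ring]
        by_cases h3 : PySem.Str.strIsdigit
            (PySem.Str.slice s (some ((k + 5 : Nat) : Int)) none) = true
        case neg => rw [if_neg h3]
        case pos =>
          exfalso
          apply hB
          simp only [PySem.Str.strIsdigit, PySem.Str.slice, String.toList_ofList,
            PySem.Chars.slice_eq_listSlice, PySem.List.slice_from_natCast,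
            PySem.Chars.strIsdigit, Bool.and_eq_true] at h3
          obtain ⟨hne0, hall0⟩ := h3
          have hne' : List.drop (k + 5) s.toList ≠ [] := by simpa using hne0
          have hall : ∀ c ∈ List.drop (k + 5) s.toList, PySem.Chars.isdigit c = true :=
            List.all_eq_true.1 hall0
          have hk5 : k + 5 ≤ n := by
            have := hkpre.length_le
            simp only [List.length_drop, hcopy, List.length_cons, List.length_nil] at this
            omega
          have hklt : k + 5 < n := by
            rcases Nat.lt_or_ge (k + 5) n with h | h
            · exact h
            · exact absurd (List.drop_eq_nil_iff.2 (by omega)) hne'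
          have hdig2 : ∀ m, k + 5 ≤ m → m < n → PySem.Chars.isdigit (cs.getD m ' ') = true := by
            intro m hm1 hm2
            have hlt : m - (k + 5) < (List.drop (k + 5) cs).length := by
              simp only [List.length_drop]; omega
            have : cs.getD m ' ' = (List.drop (k + 5) cs)[m - (k + 5)]'hlt := by
              rw [List.getD_eq_getElem _ _ hm2, List.getElem_drop]
              congr 1
              omega
            rw [this]
            exact hall _ (List.getElem_mem hlt)
          have hy : cs.getD (k + 4) ' ' = 'y' := by
            have h4 : (4 : Nat) < ("_copy".toList).length := by simp [hcopy]
            have hg := List.IsPrefix.getElem hkpre h4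
            have hdrop : (List.drop k cs)[4]'(by simp only [List.length_drop]; omega)
                = cs[k + 4]'(by omega) := by
              rw [List.getElem_drop]
            have hc4 : "_copy".toList[4]'h4 = 'y' := rfl
            have hy4 : (List.drop k cs)[4]'(by simp only [List.length_drop]; omega) = 'y' :=
              hg.symm.trans hc4
            rw [List.getD_eq_getElem _ _ (by omega)]
            exact hdrop.symm.trans hy4
          have hieq : i = k + 5 := by
            rw [hi]
            exact digStart_eq cs (k + 5) n (by omega) hdig2
              (Or.inr (by rw [show k + 5 - 1 = k + 4 by omega, hy]; decide))
          constructor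
          · omega
          · obtain ⟨t, ht⟩ := hkpre
            have htake : List.take i cs = List.take k cs ++ "_copy".toList := by
              rw [hieq, List.take_add, ← ht, List.take_left' (by simp [hcopy])]
            rw [htake, PySem.Chars.endswith_iff]
            exact ⟨List.take k cs, rfl⟩

theorem item_eq (s : String) : clean_copy_suffix_from_id s = pvCleanItemAlt s := by
  by_cases hs : s = ""
  · subst hs; rfl
  · unfold clean_copy_suffix_from_id pvCleanItemAlt
    rw [if_neg (by simpa using hs)]
    exact item_eq_core s

-- ===== VERDICT (by name: the statement is the Claim_ definition above) =====
theorem clean_copy_suffix_from_path_spec : Claim_equal_clean_copy_suffix_from_path := by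
  intro np _
  unfold Spec_clean_copy_suffix_from_path clean_copy_suffix_from_path clean_copy_suffix_from_path_alt
  cases np with
  | nil => simp
  | cons h t =>
    rw [if_neg (by simp), PySem.List.foldl_append_singleton_eq_map]
    simp [item_eq]
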